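-- pv_equiv track=rewrite | github.com/certbot/certbot | letsencrypt-apache/letsencrypt_apache/configurator.py | get_file_path
-- ===== SOURCE A (Python) =====
-- def get_file_path(vhost_path):
--     """Get file path from augeas_vhost_path.
--
--     Takes in Augeas path and returns the file name
--
--     :param str vhost_path: Augeas virtual host path
--
--     :returns: filename of vhost
--     :rtype: str
--
--     """
--     # Strip off /files
--     avail_fp = vhost_path[6:]
--     # This can be optimized...
--     while True:
--         # Cast all to lowercase to be case insensitive
--         find_if = avail_fp.lower().find("/ifmodule")
--         if find_if != -1:
--             avail_fp = avail_fp[:find_if]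
--             continue
--         find_vh = avail_fp.lower().find("/virtualhost")
--         if find_vh != -1:
--             avail_fp = avail_fp[:find_vh]
--             continue
--         find_macro = avail_fp.lower().find("/macro")
--         if find_macro != -1:
--             avail_fp = avail_fp[:find_macro]
--             continue
--         break
--     return avail_fp
-- ===== SOURCE B (Python) =====
-- def get_file_path(vhost_path):
--     """Get file path from augeas_vhost_path (strip /files and any trailing
--     /IfModule, /VirtualHost or /Macro parts, case-insensitively)."""
--     avail_fp = vhost_path[6:]
--     low = avail_fp.lower()
--     cuts = [p for p in (low.find("/ifmodule"),
--                         low.find("/virtualhost"),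
--                         low.find("/macro")) if p != -1]
--     if cuts:
--         return avail_fp[:min(cuts)]
--     return avail_fp
-- ===== Notes on version B (the rewrite author's own statement) =====
-- stated objective: simpler
-- what changed: Replaced A's while-True loop that re-lowercases and re-scans the string after every truncation with a single lowercase pass, three finds, and one truncation at the minimum found position.
import Mathlib
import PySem

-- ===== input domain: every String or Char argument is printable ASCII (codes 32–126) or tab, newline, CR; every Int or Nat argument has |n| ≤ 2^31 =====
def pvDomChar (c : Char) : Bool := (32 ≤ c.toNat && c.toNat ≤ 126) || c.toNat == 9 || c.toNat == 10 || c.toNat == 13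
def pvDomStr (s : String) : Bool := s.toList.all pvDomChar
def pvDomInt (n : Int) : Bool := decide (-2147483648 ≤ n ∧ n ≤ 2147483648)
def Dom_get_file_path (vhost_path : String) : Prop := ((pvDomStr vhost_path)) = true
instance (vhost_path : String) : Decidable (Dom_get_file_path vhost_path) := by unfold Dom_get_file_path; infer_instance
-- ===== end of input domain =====

-- B replaces A's while-True loop (re-lowercase + re-scan after every truncation) by one
-- lowercase pass, three finds and a single truncation at the minimum found position (objective: simpler).

-- ===== PORT A =====
-- termination helper for A's while loop: truncating at a found marker strictly shrinks the string
theorem pvCutShrink (s M : List Char) (hM : M ≠ [])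
    (h : PySem.Chars.find (PySem.Chars.lower s) M ≠ -1) :
    (PySem.Chars.slice s none (some (PySem.Chars.find (PySem.Chars.lower s) M))).length < s.length := by
  have h0 : 0 ≤ PySem.Chars.find (PySem.Chars.lower s) M := by
    have := PySem.Chars.neg_one_le_find (PySem.Chars.lower s) M; omega
  obtain ⟨hocc, -⟩ := PySem.Chars.find_spec h0
  have hlen : (PySem.Chars.find (PySem.Chars.lower s) M).toNat < (PySem.Chars.lower s).length := by
    have hle := hocc.length_le
    have : 0 < M.length := List.length_pos_iff.mpr hM
    have hdl : (List.drop (PySem.Chars.find (PySem.Chars.lower s) M).toNat (PySem.Chars.lower s)).length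
        = (PySem.Chars.lower s).length - (PySem.Chars.find (PySem.Chars.lower s) M).toNat :=
      List.length_drop
    omega
  have hll : (PySem.Chars.lower s).length = s.length := by
    simp [PySem.Chars.lower]
  rw [PySem.Chars.slice_eq_listSlice, PySem.List.slice_to _ h0]
  simp only [List.length_take]
  omega

def pvLoopA (avail_fp : List Char) : List Char :=
  let find_if := PySem.Chars.find (PySem.Chars.lower avail_fp) "/ifmodule".toList
  if h1 : find_if ≠ -1 then
    pvLoopA (PySem.Chars.slice avail_fp none (some find_if))
  else
    let find_vh := PySem.Chars.find (PySem.Chars.lower avail_fp) "/virtualhost".toList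
    if h2 : find_vh ≠ -1 then
      pvLoopA (PySem.Chars.slice avail_fp none (some find_vh))
    else
      let find_macro := PySem.Chars.find (PySem.Chars.lower avail_fp) "/macro".toList
      if h3 : find_macro ≠ -1 then
        pvLoopA (PySem.Chars.slice avail_fp none (some find_macro))
      else
        avail_fp
termination_by avail_fp.length
decreasing_by
  · exact pvCutShrink _ _ (by decide) h1
  · exact pvCutShrink _ _ (by decide) h2
  · exact pvCutShrink _ _ (by decide) h3

def get_file_path (vhost_path : String) : String :=
  String.ofList (pvLoopA (PySem.Chars.slice vhost_path.toList (some 6) none))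

-- ===== PORT B =====
def get_file_path_alt (vhost_path : String) : String :=
  let avail_fp := PySem.Chars.slice vhost_path.toList (some 6) none
  let low := PySem.Chars.lower avail_fp
  let cuts := [PySem.Chars.find low "/ifmodule".toList,
               PySem.Chars.find low "/virtualhost".toList,
               PySem.Chars.find low "/macro".toList].filter (fun p => p != -1)
  match cuts with
  | [] => String.ofList avail_fp
  | c :: cs => String.ofList (PySem.Chars.slice avail_fp none (some (cs.foldl min c)))

-- ===== PRECONDITION & SPEC =====
def Spec_get_file_path (vhost_path : String) (out : String) : Prop := out = get_file_path_alt vhost_path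
instance (vhost_path : String) (out : String) : Decidable (Spec_get_file_path vhost_path out) := by unfold Spec_get_file_path; infer_instance

-- ===== CLAIM (what is proved, stated in full; the proofs are below) =====
def Claim_equal_get_file_path : Prop := ∀ (vhost_path : String), Dom_get_file_path vhost_path → Spec_get_file_path vhost_path (get_file_path vhost_path)

-- ===== LEMMAS AND PROOFS =====

def pvMarkers : List (List Char) := ["/ifmodule".toList, "/virtualhost".toList, "/macro".toList]

theorem pvMarker_ne_nil {M : List Char} (hM : M ∈ pvMarkers) : M ≠ [] := by
  simp only [pvMarkers, List.mem_cons, List.not_mem_nil, or_false] at hM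
  rcases hM with rfl | rfl | rfl <;> decide

theorem pvMarker_head {M : List Char} (hM : M ∈ pvMarkers) : M[0]? = some '/' := by
  simp only [pvMarkers, List.mem_cons, List.not_mem_nil, or_false] at hM
  rcases hM with rfl | rfl | rfl <;> decide

theorem pvMarker_noSlash {M : List Char} (hM : M ∈ pvMarkers) (k : Nat) (hk : 0 < k) :
    M[k]? ≠ some '/' := by
  by_cases hlt : k < M.length
  · simp only [pvMarkers, List.mem_cons, List.not_mem_nil, or_false] at hM
    rcases hM with rfl | rfl | rfl <;>
      (revert hk; revert hlt; revert k; decide)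
  · rw [List.getElem?_eq_none (by omega)]
    simp

theorem pvPrefix_getElem {u v : List Char} {i : Nat} (h : u <+: v) (hi : i < u.length) :
    v[i]? = u[i]? := by
  obtain ⟨w, rfl⟩ := h
  rw [List.getElem?_append_left hi]

-- two marker occurrences cannot overlap: all markers start with '/' and contain no other '/'
theorem pvNonoverlap {t M M' : List Char} (hM : M ∈ pvMarkers) (hM' : M' ∈ pvMarkers)
    {p q : Nat} (hp : M <+: t.drop p) (hq : M' <+: t.drop q) (hlt : q < p) :
    q + M'.length ≤ p := by
  by_contra hcon
  have hk1 : 0 < p - q := by omega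
  have hk2 : p - q < M'.length := by omega
  have hMlen : 0 < M.length := List.length_pos_iff.mpr (pvMarker_ne_nil hM)
  have e1 : (t.drop p)[0]? = M[0]? := pvPrefix_getElem hp hMlen
  have e2 : (t.drop q)[p - q]? = M'[p - q]? := pvPrefix_getElem hq hk2
  rw [List.getElem?_drop] at e1 e2
  have : p + 0 = q + (p - q) := by omega
  rw [this] at e1
  have := pvMarker_noSlash hM' (p - q) hk1
  rw [← e2, e1, pvMarker_head hM] at this
  exact this rfl

theorem pvFind_eq_of_occ {t M : List Char} {q : Nat} (hq : M <+: t.drop q)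
    (hmin : ∀ i < q, ¬ M <+: t.drop i) : PySem.Chars.find t M = (q : Int) := by
  have hinf : M <:+: t := by
    rw [← PySem.Chars.isIn_iff_infix, ← PySem.Chars.exists_prefix_drop_iff_isIn]
    exact ⟨q, hq⟩
  have hne : PySem.Chars.find t M ≠ -1 := (PySem.Chars.find_ne_neg_one_iff t M).mpr hinf
  have h0 : 0 ≤ PySem.Chars.find t M := by
    have := PySem.Chars.neg_one_le_find t M; omega
  obtain ⟨hocc, hmin'⟩ := PySem.Chars.find_spec h0
  have hle : (PySem.Chars.find t M).toNat ≤ q := by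
    by_contra hgt
    exact hmin' q (by omega) hq
  have hge : q ≤ (PySem.Chars.find t M).toNat := by
    by_contra hgt
    exact hmin _ (by omega) hocc
  omega

theorem pvOcc_of_occ_take {t M : List Char} {p r : Nat} (hM : M ≠ [])
    (h : M <+: (t.take p).drop r) : M <+: t.drop r ∧ r + M.length ≤ p := by
  rw [List.drop_take, List.prefix_take_iff] at h
  have : 0 < M.length := List.length_pos_iff.mpr hM
  exact ⟨h.1, by omega⟩

-- the central lemma: truncating at a found marker keeps exactly the strictly-earlier finds
theorem pvFind_take_eq {t Mi M' : List Char} (hMi : Mi ∈ pvMarkers) (hM' : M' ∈ pvMarkers)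
    (hfi : PySem.Chars.find t Mi ≠ -1) :
    PySem.Chars.find (t.take (PySem.Chars.find t Mi).toNat) M'
      = if PySem.Chars.find t M' ≠ -1 ∧ PySem.Chars.find t M' < PySem.Chars.find t Mi
        then PySem.Chars.find t M' else -1 := by
  have h0i : 0 ≤ PySem.Chars.find t Mi := by
    have := PySem.Chars.neg_one_le_find t Mi; omega
  obtain ⟨hocci, -⟩ := PySem.Chars.find_spec h0i
  split_ifs with hcond
  · obtain ⟨hne, hlt⟩ := hcond
    have h0 : 0 ≤ PySem.Chars.find t M' := by
      have := PySem.Chars.neg_one_le_find t M'; omega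
    obtain ⟨hocc, hmin⟩ := PySem.Chars.find_spec h0
    have hqp : (PySem.Chars.find t M').toNat < (PySem.Chars.find t Mi).toNat := by omega
    have hno := pvNonoverlap hMi hM' hocci hocc hqp
    have hocc' : M' <+: (t.take (PySem.Chars.find t Mi).toNat).drop (PySem.Chars.find t M').toNat := by
      rw [List.drop_take, List.prefix_take_iff]
      exact ⟨hocc, by omega⟩
    have := pvFind_eq_of_occ hocc' (fun i hi hpre =>
      hmin i hi (pvOcc_of_occ_take (pvMarker_ne_nil hM') hpre).1)
    omega
  · rw [PySem.Chars.find_eq_neg_one_iff]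
    intro hinf
    obtain ⟨r, hr⟩ := (PySem.Chars.exists_prefix_drop_iff_isIn M' _).mpr
      ((PySem.Chars.isIn_iff_infix M' _).mpr hinf)
    obtain ⟨hrt, hrp⟩ := pvOcc_of_occ_take (pvMarker_ne_nil hM') hr
    have hM'len : 0 < M'.length := List.length_pos_iff.mpr (pvMarker_ne_nil hM')
    have hne : PySem.Chars.find t M' ≠ -1 := by
      rw [PySem.Chars.find_ne_neg_one_iff]
      rw [← PySem.Chars.isIn_iff_infix, ← PySem.Chars.exists_prefix_drop_iff_isIn]
      exact ⟨r, hrt⟩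
    have h0 : 0 ≤ PySem.Chars.find t M' := by
      have := PySem.Chars.neg_one_le_find t M'; omega
    obtain ⟨-, hmin⟩ := PySem.Chars.find_spec h0
    have hle : (PySem.Chars.find t M').toNat ≤ r := by
      by_contra hgt
      exact hmin r (by omega) hrt
    exact hcond ⟨hne, by omega⟩

-- B's core, on lists
def pvB (l : List Char) : List Char :=
  match ([PySem.Chars.find (PySem.Chars.lower l) "/ifmodule".toList,
          PySem.Chars.find (PySem.Chars.lower l) "/virtualhost".toList,
          PySem.Chars.find (PySem.Chars.lower l) "/macro".toList].filter (fun p => p != -1)) with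
  | [] => l
  | c :: cs => PySem.Chars.slice l none (some (cs.foldl min c))

theorem pvAlt_eq (v : String) :
    get_file_path_alt v = String.ofList (pvB (PySem.Chars.slice v.toList (some 6) none)) := by
  simp only [get_file_path_alt, pvB]
  split <;> rfl

theorem pvLower_take (l : List Char) (n : Nat) :
    PySem.Chars.lower (l.take n) = (PySem.Chars.lower l).take n := by
  simp [PySem.Chars.lower, List.map_take]

theorem pvSlice_to (l : List Char) (x : Int) (hx : 0 ≤ x) :
    PySem.Chars.slice l none (some x) = l.take x.toNat := by
  rw [PySem.Chars.slice_eq_listSlice, PySem.List.slice_to _ hx]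

-- pure arithmetic step: B of the truncated string equals B of the whole string
set_option maxRecDepth 4096 in
theorem pvStep (l : List Char) (f1 f2 f3 fi : Int)
    (hset : fi = f1 ∨ fi = f2 ∨ fi = f3) (h0 : 0 ≤ fi)
    (h1 : -1 ≤ f1) (h2 : -1 ≤ f2) (h3 : -1 ≤ f3)
    (g1 g2 g3 : Int)
    (e1 : g1 = if f1 ≠ -1 ∧ f1 < fi then f1 else -1)
    (e2 : g2 = if f2 ≠ -1 ∧ f2 < fi then f2 else -1)
    (e3 : g3 = if f3 ≠ -1 ∧ f3 < fi then f3 else -1) :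
    (match ([g1, g2, g3].filter (fun p => p != -1)) with
     | [] => l.take fi.toNat
     | c :: cs => PySem.Chars.slice (l.take fi.toNat) none (some (cs.foldl min c)))
    = (match ([f1, f2, f3].filter (fun p => p != -1)) with
     | [] => l
     | c :: cs => PySem.Chars.slice l none (some (cs.foldl min c))) := by
  subst e1 e2 e3
  by_cases hb1 : f1 = -1 <;> by_cases hb2 : f2 = -1 <;> by_cases hb3 : f3 = -1 <;>
    split_ifs with H1 H2 H3 <;>
    simp only [List.filter_cons, List.filter_nil, bne_iff_ne, ne_eq, hb1, hb2, hb3,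
      not_false_eq_true, ite_true, ite_false, List.foldl_cons, List.foldl_nil,
      bne_self_eq_false, Bool.false_eq_true] <;>
  first
  | rfl
  | omega
  | (rcases hset with rfl | rfl | rfl <;> omega)
  | (rw [pvSlice_to _ _ (by rcases hset with rfl | rfl | rfl <;> omega)]; congr 1;
     rcases hset with rfl | rfl | rfl <;> omega)
  | (rw [pvSlice_to _ _ (by rcases hset with rfl | rfl | rfl <;> omega),
         pvSlice_to _ _ (by rcases hset with rfl | rfl | rfl <;> omega), List.take_take];
     congr 1; rcases hset with rfl | rfl | rfl <;> omega)

theorem pvFindLt {s M : List Char} (hM : M ≠ [])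
    (h : PySem.Chars.find (PySem.Chars.lower s) M ≠ -1) :
    (PySem.Chars.find (PySem.Chars.lower s) M).toNat < s.length := by
  have h0 : 0 ≤ PySem.Chars.find (PySem.Chars.lower s) M := by
    have := PySem.Chars.neg_one_le_find (PySem.Chars.lower s) M; omega
  obtain ⟨hocc, -⟩ := PySem.Chars.find_spec h0
  have hle := hocc.length_le
  have hpos : 0 < M.length := List.length_pos_iff.mpr hM
  have hdl : (List.drop (PySem.Chars.find (PySem.Chars.lower s) M).toNat (PySem.Chars.lower s)).length
      = (PySem.Chars.lower s).length - (PySem.Chars.find (PySem.Chars.lower s) M).toNat :=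
    List.length_drop
  have hll : (PySem.Chars.lower s).length = s.length := by simp [PySem.Chars.lower]
  omega

theorem pvB_take (l : List Char) {Mi : List Char} (hMi : Mi ∈ pvMarkers)
    (h : PySem.Chars.find (PySem.Chars.lower l) Mi ≠ -1) :
    pvB (l.take (PySem.Chars.find (PySem.Chars.lower l) Mi).toNat) = pvB l := by
  have hM1 : "/ifmodule".toList ∈ pvMarkers := by simp [pvMarkers]
  have hM2 : "/virtualhost".toList ∈ pvMarkers := by simp [pvMarkers]
  have hM3 : "/macro".toList ∈ pvMarkers := by simp [pvMarkers]
  have h0 : 0 ≤ PySem.Chars.find (PySem.Chars.lower l) Mi := by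
    have := PySem.Chars.neg_one_le_find (PySem.Chars.lower l) Mi; omega
  have hset : PySem.Chars.find (PySem.Chars.lower l) Mi
      = PySem.Chars.find (PySem.Chars.lower l) "/ifmodule".toList
    ∨ PySem.Chars.find (PySem.Chars.lower l) Mi
      = PySem.Chars.find (PySem.Chars.lower l) "/virtualhost".toList
    ∨ PySem.Chars.find (PySem.Chars.lower l) Mi
      = PySem.Chars.find (PySem.Chars.lower l) "/macro".toList := by
    simp only [pvMarkers, List.mem_cons, List.not_mem_nil, or_false] at hMi
    rcases hMi with rfl | rfl | rfl
    · exact Or.inl rfl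
    · exact Or.inr (Or.inl rfl)
    · exact Or.inr (Or.inr rfl)
  unfold pvB
  rw [pvLower_take]
  rw [pvFind_take_eq hMi hM1 h, pvFind_take_eq hMi hM2 h, pvFind_take_eq hMi hM3 h]
  exact pvStep l _ _ _ _ hset h0
    (PySem.Chars.neg_one_le_find _ _) (PySem.Chars.neg_one_le_find _ _)
    (PySem.Chars.neg_one_le_find _ _) _ _ _ rfl rfl rfl

theorem pvStepMain (l : List Char)
    (IH : ∀ l' : List Char, l'.length < l.length → pvLoopA l' = pvB l') :
    pvLoopA l = pvB l := by
  have hM1 : "/ifmodule".toList ∈ pvMarkers := by simp [pvMarkers]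
  have hM2 : "/virtualhost".toList ∈ pvMarkers := by simp [pvMarkers]
  have hM3 : "/macro".toList ∈ pvMarkers := by simp [pvMarkers]
  rw [pvLoopA]
  simp only [ne_eq]
  split_ifs with hf1 hf2 hf3
  · unfold pvB
    rw [hf1, hf2, hf3]
    simp
  · have h0 : 0 ≤ PySem.Chars.find (PySem.Chars.lower l) "/macro".toList := by
      have := PySem.Chars.neg_one_le_find (PySem.Chars.lower l) "/macro".toList; omega
    rw [pvSlice_to _ _ h0, IH _ (by
      rw [List.length_take]
      have := pvFindLt (s := l) (M := "/macro".toList) (by decide) hf3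
      omega)]
    exact pvB_take l hM3 hf3
  · have h0 : 0 ≤ PySem.Chars.find (PySem.Chars.lower l) "/virtualhost".toList := by
      have := PySem.Chars.neg_one_le_find (PySem.Chars.lower l) "/virtualhost".toList; omega
    rw [pvSlice_to _ _ h0, IH _ (by
      rw [List.length_take]
      have := pvFindLt (s := l) (M := "/virtualhost".toList) (by decide) hf2
      omega)]
    exact pvB_take l hM2 hf2
  · have h0 : 0 ≤ PySem.Chars.find (PySem.Chars.lower l) "/ifmodule".toList := by
      have := PySem.Chars.neg_one_le_find (PySem.Chars.lower l) "/ifmodule".toList; omega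
    rw [pvSlice_to _ _ h0, IH _ (by
      rw [List.length_take]
      have := pvFindLt (s := l) (M := "/ifmodule".toList) (by decide) hf1
      omega)]
    exact pvB_take l hM1 hf1

theorem pvLoop_eq (l : List Char) : pvLoopA l = pvB l := by
  induction hn : l.length using Nat.strong_induction_on generalizing l with
  | _ n IH =>
    subst hn
    exact pvStepMain l (fun l' hl' => IH l'.length hl' l' rfl)

-- ===== VERDICT (by name: the statement is the Claim_ definition above) =====
theorem get_file_path_spec : Claim_equal_get_file_path := by
  intro v _
  show get_file_path v = get_file_path_alt v
  rw [get_file_path, pvAlt_eq, pvLoop_eq]
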